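-- pv_equiv track=rewrite | github.com/djmmatracki/AlgorithmsAndDataStrutures | CommonChild/solution.py | longestCommon
-- ===== SOURCE A (Python) =====
-- def longestCommon(s1, s2):
--     i = 0
--     j = 0
--     while i < len(s1) and j < len(s2):
--         if s1[i] == s2[j]:
--             i += 1
--         j+= 1
--     return i
-- ===== SOURCE B (Python) =====
-- def longestCommon(s1, s2):
--     # Index s2 once: for each character, the sorted list of its positions.
--     pos = {}
--     for idx, ch in enumerate(s2):
--         pos.setdefault(ch, []).append(idx)
--     count = 0
--     cur = 0
--     for c in s1:
--         lst = pos.get(c, [])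
--         # binary search: leftmost position in lst that is >= cur
--         lo, hi = 0, len(lst)
--         while lo < hi:
--             mid = (lo + hi) // 2
--             if lst[mid] < cur:
--                 lo = mid + 1
--             else:
--                 hi = mid
--         if lo == len(lst):
--             break
--         count += 1
--         cur = lst[lo] + 1
--     return count
-- ===== Notes on version B (the rewrite author's own statement) =====
-- stated objective: alternative
-- what changed: Replaces A's two-index linear scan by a different algorithm: build a per-character position index of s2 once, then for each character of s1 binary-search that character's sorted position list for the first position >= the current cursor.
import Mathlib
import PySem

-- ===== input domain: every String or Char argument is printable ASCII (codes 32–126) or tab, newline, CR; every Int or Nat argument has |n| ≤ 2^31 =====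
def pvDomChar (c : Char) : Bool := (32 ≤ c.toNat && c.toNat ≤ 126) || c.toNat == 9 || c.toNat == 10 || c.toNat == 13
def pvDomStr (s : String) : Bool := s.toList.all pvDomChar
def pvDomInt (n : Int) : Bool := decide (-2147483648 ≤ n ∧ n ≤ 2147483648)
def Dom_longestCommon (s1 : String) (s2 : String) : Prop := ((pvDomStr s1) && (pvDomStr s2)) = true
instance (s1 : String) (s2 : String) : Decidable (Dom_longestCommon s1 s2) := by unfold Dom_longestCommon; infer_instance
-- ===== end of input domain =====

-- B replaces A's two-index linear scan by a per-character position index of s2 plus binary search (alternative algorithm, same results).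

-- ===== PORT A =====
-- A's while loop: i, j indices; advance i on match, always advance j; return i.
-- the while loop, with a fuel bound ≥ len(s2) - j (only to make it total; never reached)
def longestCommonAuxA (l1 l2 : List Char) : Nat → Nat → Nat → Nat
  | 0, i, _ => i
  | fuel + 1, i, j =>
    if h : i < l1.length ∧ j < l2.length then
      longestCommonAuxA l1 l2 fuel (if l1[i]'h.1 = l2[j]'h.2 then i + 1 else i) (j + 1)
    else i

def longestCommon (s1 : String) (s2 : String) : Int :=
  (longestCommonAuxA s1.toList s2.toList s2.toList.length 0 0 : Int)

-- ===== PORT B =====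
-- `for idx, ch in enumerate(s2): pos.setdefault(ch, []).append(idx)`  (= d[ch] = d.get(ch, []) + [idx], i.e. Dict.modify)
def buildPos (l2 : List Char) : PySem.Dict Char (List Int) :=
  (PySem.List.enumerate l2 0).foldl (fun d p => d.modify p.2 [] (· ++ [p.1])) PySem.Dict.empty

-- the `while lo < hi` loop, with a fuel bound ≥ hi - lo (only to make it total; never reached);
-- lst[mid] is always in range: hi ≤ len lst throughout
def bsearch (lst : List Int) (cur : Int) : Nat → Nat → Nat → Nat
  | 0, lo, _ => lo
  | fuel + 1, lo, hi =>
    if lo < hi then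
      let mid := (lo + hi) / 2
      if lst.getD mid 0 < cur then bsearch lst cur fuel (mid + 1) hi else bsearch lst cur fuel lo mid
    else lo

-- the `for c in s1` loop with its two breaks
def loopB (pos : PySem.Dict Char (List Int)) : List Char → Int → Int → Int
  | [], count, _ => count
  | c :: r, count, cur =>
    let lst := pos.getD c []
    let lo := bsearch lst cur lst.length 0 lst.length
    if lo = lst.length then count
    else loopB pos r (count + 1) (lst.getD lo 0 + 1)

def longestCommon_alt (s1 : String) (s2 : String) : Int :=
  loopB (buildPos s2.toList) s1.toList 0 0

-- ===== PRECONDITION & SPEC =====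
def Spec_longestCommon (s1 : String) (s2 : String) (out : Int) : Prop := out = longestCommon_alt s1 s2
instance (s1 : String) (s2 : String) (out : Int) : Decidable (Spec_longestCommon s1 s2 out) := by unfold Spec_longestCommon; infer_instance

-- ===== CLAIM (what is proved, stated in full; the proofs are below) =====
def Claim_equal_longestCommon : Prop := ∀ (s1 : String) (s2 : String), Dom_longestCommon s1 s2 → Spec_longestCommon s1 s2 (longestCommon s1 s2)

-- ===== LEMMAS AND PROOFS =====

-- reference greedy match count on the remaining lists
def greedy : List Char → List Char → Nat
  | _, [] => 0
  | [], _ :: _ => 0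
  | x :: xr, y :: yr => if x = y then 1 + greedy xr yr else greedy (x :: xr) yr

-- inner linear consume used only to state intermediate facts
def findConsume (c : Char) : List Char → Option (List Char)
  | [] => none
  | d :: t => if c = d then some t else findConsume c t

-- the position list of character c in l2
def posL (l2 : List Char) (c : Char) : List Int :=
  ((PySem.List.enumerate l2 0).filter (fun p => p.2 == c)).map (·.1)

theorem greedy_nil_left (ys : List Char) : greedy [] ys = 0 := by
  cases ys <;> simp [greedy]

theorem greedy_nil_right (xs : List Char) : greedy xs [] = 0 := by
  cases xs <;> simp [greedy]

theorem greedy_cons (c : Char) (xr ys : List Char) :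
    greedy (c :: xr) ys =
      match findConsume c ys with
      | none => 0
      | some t => 1 + greedy xr t := by
  induction ys with
  | nil => simp [greedy, findConsume]
  | cons y yr ih =>
    by_cases h : c = y
    · simp [greedy, findConsume, h]
    · simp [greedy, findConsume, h, ih]

theorem auxA_eq (l1 l2 : List Char) : ∀ k i j, l2.length - j ≤ k →
    longestCommonAuxA l1 l2 k i j = i + greedy (l1.drop i) (l2.drop j) := by
  intro k
  induction k with
  | zero =>
    intro i j hj
    have hj' : l2.length ≤ j := by omega
    rw [List.drop_of_length_le hj', greedy_nil_right]
    rfl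
  | succ k ih =>
    intro i j hj
    rw [longestCommonAuxA]
    by_cases h : i < l1.length ∧ j < l2.length
    · rw [dif_pos h]
      have hd1 : l1.drop i = l1[i]'h.1 :: l1.drop (i + 1) :=
        (List.drop_eq_getElem_cons h.1)
      have hd2 : l2.drop j = l2[j]'h.2 :: l2.drop (j + 1) :=
        (List.drop_eq_getElem_cons h.2)
      by_cases he : l1[i]'h.1 = l2[j]'h.2
      · rw [if_pos he, ih (i+1) (j+1) (by omega)]
        rw [hd1, hd2, greedy, if_pos he]
        omega
      · rw [if_neg he, ih i (j+1) (by omega)]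
        rw [hd1, hd2, greedy, if_neg he]
    · rw [dif_neg h]
      rcases not_and_or.mp h with h1 | h2
      · have e1 : List.drop i l1 = [] := List.drop_of_length_le (by omega)
        rw [e1, greedy_nil_left]
        exact (Nat.add_zero i).symm
      · have e2 : List.drop j l2 = [] := List.drop_of_length_le (by omega)
        rw [e2, greedy_nil_right]
        exact (Nat.add_zero i).symm

-- the dict built by B holds exactly the position lists
theorem getD_buildPos (l2 : List Char) (c : Char) :
    (buildPos l2).getD c [] = posL l2 c := by
  have h : buildPos l2 = ((PySem.List.enumerate l2 0).map Prod.swap).foldl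
      (fun d p => d.modify p.1 [] (· ++ [p.2])) PySem.Dict.empty := by
    rw [List.foldl_map]; rfl
  rw [h, PySem.Dict.getD_foldl_modify_append]
  simp [posL, List.filter_map, List.map_map, Function.comp_def]

-- membership in the position list
theorem mem_posL (l2 : List Char) (c : Char) (i : Int) :
    i ∈ posL l2 c ↔ ∃ (k : Nat) (h : k < l2.length), i = (k : Int) ∧ l2[k] = c := by
  simp only [posL, List.mem_map, List.mem_filter, PySem.List.mem_enumerate_iff]
  constructor
  · rintro ⟨p, ⟨⟨k, hk, rfl⟩, hc⟩, rfl⟩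
    exact ⟨k, hk, by simpa using hc⟩
  · rintro ⟨k, hk, rfl, hc⟩
    exact ⟨((k : Int), l2[k]), ⟨⟨k, hk, by simp⟩, by simpa using hc⟩, rfl⟩

-- the position list is strictly increasing
theorem posL_sorted (l2 : List Char) (c : Char) :
    (posL l2 c).Pairwise (· < ·) := by
  have := PySem.List.pairwise_lt_enumerate l2 (0 : Int)
  exact List.pairwise_map.mpr ((this.filter _))

-- binary search: invariant proof
theorem bsearch_spec (lst : List Int) (cur : Int)
    (hs : lst.Pairwise (· < ·)) :
    ∀ fuel lo hi, hi - lo ≤ fuel → lo ≤ hi → hi ≤ lst.length →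
    (∀ k (hk : k < lst.length), k < lo → lst[k] < cur) →
    (∀ k (hk : k < lst.length), hi ≤ k → ¬ lst[k] < cur) →
    (bsearch lst cur fuel lo hi ≤ lst.length ∧
     (∀ k (hk : k < lst.length), k < bsearch lst cur fuel lo hi → lst[k] < cur) ∧
     (∀ k (hk : k < lst.length), bsearch lst cur fuel lo hi ≤ k → ¬ lst[k] < cur)) := by
  have hmono : ∀ a b (ha : a < lst.length) (hb : b < lst.length), a ≤ b → lst[a] ≤ lst[b] := by
    intro a b ha hb hab
    rcases Nat.lt_or_ge a b with h | h
    · exact le_of_lt ((List.pairwise_iff_getElem.mp hs) a b ha hb h)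
    · have : a = b := by omega
      subst this; rfl
  intro fuel
  induction fuel with
  | zero =>
    intro lo hi hf hlh hhl hpre hpost
    have : hi = lo := by omega
    subst this
    simp only [bsearch]
    exact ⟨by omega, fun k hk h => hpre k hk h, fun k hk h => hpost k hk h⟩
  | succ fuel ih =>
    intro lo hi hf hlh hhl hpre hpost
    rw [bsearch]
    by_cases h : lo < hi
    · rw [if_pos h]
      have hmid : lo ≤ (lo + hi) / 2 ∧ (lo + hi) / 2 < hi := by omega
      have hmlen : (lo + hi) / 2 < lst.length := by omega
      have hget : lst.getD ((lo + hi) / 2) 0 = lst[(lo + hi) / 2] := List.getD_eq_getElem lst 0 hmlen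
      by_cases hc : lst.getD ((lo + hi) / 2) 0 < cur
      · rw [if_pos hc]
        refine ih ((lo+hi)/2 + 1) hi (by omega) (by omega) hhl ?_ hpost
        intro k hk hklt
        calc lst[k] ≤ lst[(lo+hi)/2] := hmono k _ hk hmlen (by omega)
          _ < cur := by rw [hget] at hc; exact hc
      · rw [if_neg hc]
        refine ih lo ((lo+hi)/2) (by omega) (by omega) (by omega) hpre ?_
        intro k hk hge hlt
        have : lst[(lo+hi)/2] ≤ lst[k] := hmono _ k hmlen hk hge
        rw [hget] at hc
        omega
    · rw [if_neg h]
      have : hi = lo := by omega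
      subst this
      exact ⟨by omega, fun k hk hkl => hpre k hk hkl, fun k hk hkl => hpost k hk hkl⟩

-- findConsume on a drop: none case
theorem findConsume_drop_none (l2 : List Char) (c : Char) :
    ∀ fuel n, l2.length - n ≤ fuel →
    (∀ p (hp : p < l2.length), n ≤ p → l2[p] ≠ c) →
    findConsume c (l2.drop n) = none := by
  intro fuel
  induction fuel with
  | zero =>
    intro n hf h
    rw [List.drop_of_length_le (by omega)]
    rfl
  | succ fuel ih =>
    intro n hf h
    by_cases hn : n < l2.length
    · rw [List.drop_eq_getElem_cons hn, findConsume]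
      rw [if_neg (fun he => h n hn le_rfl he.symm)]
      exact ih (n+1) (by omega) (fun p hp hnp => h p hp (by omega))
    · rw [List.drop_of_length_le (by omega)]; rfl

-- findConsume on a drop: first-hit case
theorem findConsume_drop_some (l2 : List Char) (c : Char) :
    ∀ fuel n p₀ (hp₀ : p₀ < l2.length), l2.length - n ≤ fuel → n ≤ p₀ → l2[p₀] = c →
    (∀ q (hq : q < l2.length), n ≤ q → q < p₀ → l2[q] ≠ c) →
    findConsume c (l2.drop n) = some (l2.drop (p₀ + 1)) := by
  intro fuel
  induction fuel with
  | zero =>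
    intro n p₀ hp₀ hf hnp hc hmin
    omega
  | succ fuel ih =>
    intro n p₀ hp₀ hf hnp hc hmin
    have hn : n < l2.length := by omega
    rw [List.drop_eq_getElem_cons hn, findConsume]
    by_cases he : c = l2[n]
    · rw [if_pos he]
      have : n = p₀ := by
        by_contra hne
        exact hmin n hn le_rfl (by omega) he.symm
      subst this; rfl
    · rw [if_neg he]
      have hnp' : n ≠ p₀ := by intro h; subst h; exact he hc.symm
      exact ih (n+1) p₀ hp₀ (by omega) (by omega) hc (fun q hq h1 h2 => hmin q hq (by omega) h2)

-- B's loop computes the greedy count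
theorem loopB_eq (l2 : List Char) : ∀ (xs : List Char) (n : Nat) (count : Int),
    loopB (buildPos l2) xs count (n : Int) = count + (greedy xs (l2.drop n) : Int) := by
  intro xs
  induction xs with
  | nil => intro n count; simp [loopB, greedy_nil_left]
  | cons c r ih =>
    intro n count
    have hL := getD_buildPos l2 c
    set L := posL l2 c with hLdef
    have hsorted := posL_sorted l2 c
    have hmonoLt : ∀ a b (ha : a < L.length) (hb : b < L.length), a < b → L[a] < L[b] :=
      fun a b ha hb hab => (List.pairwise_iff_getElem.mp hsorted) a b ha hb hab
    obtain ⟨hjle, hlt, hge⟩ := bsearch_spec L (n : Int) hsorted L.length 0 L.length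
      (by omega) (by omega) le_rfl (by omega) (by omega)
    set j := bsearch L (n : Int) L.length 0 L.length with hjdef
    rw [loopB]
    simp only [hL, ← hjdef]
    by_cases hj : j = L.length
    · rw [if_pos hj]
      have hnone : findConsume c (l2.drop n) = none := by
        apply findConsume_drop_none l2 c l2.length n (by omega)
        intro p hp hnp hpc
        have : ((p : Int)) ∈ L := (mem_posL l2 c p).mpr ⟨p, hp, rfl, hpc⟩
        obtain ⟨m, hm, hLm⟩ := List.getElem_of_mem this
        have := hlt m hm (by omega)
        rw [hLm] at this
        omega
      rw [greedy_cons, hnone]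
      simp
    · rw [if_neg hj]
      have hjlen : j < L.length := by omega
      have hmem : L[j] ∈ L := List.getElem_mem hjlen
      obtain ⟨k, hk, hki, hkc⟩ := (mem_posL l2 c L[j]).mp hmem
      have hnk : (n : Int) ≤ L[j] := by
        have := hge j hjlen le_rfl
        omega
      have hnk' : n ≤ k := by omega
      have hsome : findConsume c (l2.drop n) = some (l2.drop (k + 1)) := by
        apply findConsume_drop_some l2 c l2.length n k hk (by omega) hnk' hkc
        intro q hq hnq hqk hqc
        have : ((q : Int)) ∈ L := (mem_posL l2 c q).mpr ⟨q, hq, rfl, hqc⟩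
        obtain ⟨m, hm, hLm⟩ := List.getElem_of_mem this
        have hmj : m < j := by
          by_contra hmj
          have : L[j] ≤ L[m] := by
            rcases Nat.lt_or_ge j m with h | h
            · exact le_of_lt (hmonoLt j m hjlen hm h)
            · have : m = j := by omega
              subst this; rfl
          omega
        have := hlt m hm hmj
        omega
      have hgetD : L.getD j 0 = L[j] := List.getD_eq_getElem L 0 hjlen
      rw [hgetD, hki]
      have : ((k : Int) + 1) = ((k + 1 : Nat) : Int) := by push_cast; ring
      rw [this, ih (k + 1) (count + 1)]
      rw [greedy_cons, hsome]
      push_cast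
      ring

-- ===== VERDICT (by name: the statement is the Claim_ definition above) =====
theorem longestCommon_spec : Claim_equal_longestCommon := by
  intro s1 s2 _
  unfold Spec_longestCommon longestCommon longestCommon_alt
  rw [auxA_eq s1.toList s2.toList s2.toList.length 0 0 (by omega)]
  have := loopB_eq s2.toList s1.toList 0 0
  simpa using this.symm
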